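-- pv_equiv track=rewrite | github.com/iShettyPrathvi/Prcatice-Scaler | Problems/DSA/sliding_window.py | solveTogether
-- ===== SOURCE A (Python) =====
-- def solveTogether(A, B):
--
--     min_swap = 0
--     no_of_items_less_b = 0
--
--     for it in A:
--         if (it <= B):
--             no_of_items_less_b += 1
--
--     window = no_of_items_less_b
--
--     swap = 0
--
--     for idx in range(0, window):
--         if A[idx] > B:
--             swap += 1
--
--     min_swap = swap
--
--     st = 1
--     end = window
--     while (end < len(A)):
--         if (A[st-1] > B):
--             swap -= 1
--         if (A[end] > B):
--             swap += 1
--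
--         min_swap = min(swap, min_swap)
--         st += 1
--         end += 1
--
--     return min_swap
-- ===== SOURCE B (Python) =====
-- def solveTogether(A, B):
--     # Prefix-sum table of "bad" elements (> B); answer = min over windows of size k.
--     n = len(A)
--     P = [0]
--     for x in A:
--         P.append(P[-1] + (1 if x > B else 0))
--     k = n - P[n]          # count of elements <= B
--     return min(P[i + k] - P[i] for i in range(n - k + 1))
-- ===== Notes on version B (the rewrite author's own statement) =====
-- stated objective: alternative
-- what changed: Replaces A's incremental sliding window (running swap counter updated element-by-element with explicit st/end pointers) by a materialized prefix-sum table P and a separate scan taking min of P[i+k]-P[i] over all window starts.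
import Mathlib
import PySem

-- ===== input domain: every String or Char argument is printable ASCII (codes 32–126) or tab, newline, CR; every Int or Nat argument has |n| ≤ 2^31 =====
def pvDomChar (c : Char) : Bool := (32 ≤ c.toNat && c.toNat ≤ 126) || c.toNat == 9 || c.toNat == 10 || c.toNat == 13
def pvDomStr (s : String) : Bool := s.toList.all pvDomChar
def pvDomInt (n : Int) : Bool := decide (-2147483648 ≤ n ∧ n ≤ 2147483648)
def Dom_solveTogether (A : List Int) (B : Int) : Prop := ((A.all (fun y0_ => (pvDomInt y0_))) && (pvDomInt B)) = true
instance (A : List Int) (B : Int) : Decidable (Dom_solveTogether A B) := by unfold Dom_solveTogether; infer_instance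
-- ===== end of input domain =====

-- B replaces A's incremental sliding window by a materialized prefix-sum table and a
-- separate min scan over all window positions (objective: simpler/alternative; same cost).

-- ===== PORT A =====
-- literal transliteration of A: count ≤ B, sum the first window, then slide with state
-- (swap, min_swap, st); indices are always in range, so pyGetD's default is never used.
def solveTogether (A : List Int) (B : Int) : Int :=
  let no_of_items_less_b : Int :=
    A.foldl (fun c it => if it ≤ B then c + 1 else c) 0
  let window := no_of_items_less_b
  let swap : Int :=
    (PySem.List.pyRange 0 window 1).foldl
      (fun s idx => if B < PySem.List.pyGetD A idx 0 then s + 1 else s) 0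
  let res :=
    (PySem.List.pyRange window (A.length : Int) 1).foldl
      (fun (st : Int × Int × Int) e =>
        let swap1 := if B < PySem.List.pyGetD A (st.2.2 - 1) 0 then st.1 - 1 else st.1
        let swap2 := if B < PySem.List.pyGetD A e 0 then swap1 + 1 else swap1
        (swap2, min swap2 st.2.1, st.2.2 + 1))
      (swap, swap, 1)
  res.2.1

-- ===== PORT B =====
-- literal transliteration of Source B: build the prefix list P, read k off its last entry,
-- and take the min of P[i+k] - P[i] over i = 0 .. n-k.
def solveTogether_alt (A : List Int) (B : Int) : Int :=
  let n : Int := (A.length : Int)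
  let P : List Int :=
    A.foldl (fun P x => P ++ [PySem.List.pyGetD P (-1) 0 + (if B < x then 1 else 0)]) [0]
  let k : Int := n - PySem.List.pyGetD P n 0
  let vals := (PySem.List.pyRange 0 (n - k + 1) 1).map
      (fun i => PySem.List.pyGetD P (i + k) 0 - PySem.List.pyGetD P i 0)
  (PySem.List.min? vals (fun y => y)).getD 0

-- ===== PRECONDITION & SPEC =====
def Spec_solveTogether (A : List Int) (B : Int) (out : Int) : Prop := out = solveTogether_alt A B
instance (A : List Int) (B : Int) (out : Int) : Decidable (Spec_solveTogether A B out) := by unfold Spec_solveTogether; infer_instance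

-- ===== CLAIM (what is proved, stated in full; the proofs are below) =====
def Claim_equal_solveTogether : Prop := ∀ (A : List Int) (B : Int), Dom_solveTogether A B → Spec_solveTogether A B (solveTogether A B)

-- ===== LEMMAS AND PROOFS =====

-- 0/1 marker of a "bad" element (one that must be swapped out of the window)
def pvBad (B a : Int) : Int := if B < a then 1 else 0

-- prefix sum of bad markers over the first i elements
def pvPref (A : List Int) (B : Int) (i : Nat) : Int := ((A.take i).map (pvBad B)).sum

-- number of bad elements in the size-k window starting at i
def pvW (A : List Int) (B : Int) (k i : Nat) : Int := pvPref A B (i + k) - pvPref A B i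

-- the running-min recursion both programs reduce to
def pvMins (A : List Int) (B : Int) (k : Nat) (mn : Int) (i r : Nat) : Int :=
  match r with
  | 0 => mn
  | r + 1 => pvMins A B k (min (pvW A B k (i + 1)) mn) (i + 1) r

-- the tail of B's prefix list, as produced by its building fold
def pvScan (B : Int) (s : Int) : List Int → List Int
  | [] => []
  | x :: xs => (s + pvBad B x) :: pvScan B (s + pvBad B x) xs

theorem pvScan_length (B s : Int) (A : List Int) : (pvScan B s A).length = A.length := by
  induction A generalizing s with
  | nil => rfl
  | cons x xs ih => simp [pvScan, ih]

theorem pvScan_getElem (A : List Int) (B s : Int) (j : Nat) (hj : j < A.length) :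
    (pvScan B s A)[j]'(by rw [pvScan_length]; exact hj) = s + pvPref A B (j + 1) := by
  induction A generalizing s j with
  | nil => simp at hj
  | cons x xs ih =>
    cases j with
    | zero => simp [pvScan, pvPref, pvBad]
    | succ j =>
      have := ih (s + pvBad B x) j (by simpa using hj)
      simp only [pvScan, List.getElem_cons_succ, this, pvPref, List.take_succ_cons,
        List.map_cons, List.sum_cons]
      ring

theorem pvGetD_last (l : List Int) (a : Int) :
    PySem.List.pyGetD (l ++ [a]) (-1) 0 = a := by
  simp [PySem.List.pyGetD, PySem.List.pyGet?, PySem.List.pyIdx?]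

theorem pvBuildP (A : List Int) (B : Int) (pre : List Int) (s : Int)
    (h : PySem.List.pyGetD pre (-1) 0 = s) :
    A.foldl (fun P x => P ++ [PySem.List.pyGetD P (-1) 0 + (if B < x then 1 else 0)]) pre
      = pre ++ pvScan B s A := by
  induction A generalizing pre s with
  | nil => simp [pvScan]
  | cons x xs ih =>
    simp only [List.foldl_cons, pvScan, h, pvBad]
    rw [ih (pre ++ [s + if B < x then 1 else 0]) (s + if B < x then 1 else 0)
      (pvGetD_last _ _)]
    simp


theorem pvP_get (A : List Int) (B : Int) (i : Nat) (hi : i ≤ A.length) :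
    PySem.List.pyGetD (0 :: pvScan B 0 A) (i : Int) 0 = pvPref A B i := by
  rw [PySem.List.pyGetD_natCast]
  cases i with
  | zero => simp [pvPref]
  | succ j =>
    have hj : j < A.length := by omega
    have hlen : j < (pvScan B 0 A).length := by rw [pvScan_length]; exact hj
    rw [List.getD_cons_succ, List.getD_eq_getElem _ _ hlen, pvScan_getElem A B 0 j hj]
    ring

theorem pvPref_succ (A : List Int) (B : Int) (m : Nat) (hm : m < A.length) :
    pvPref A B (m + 1) = pvPref A B m + pvBad B (A[m]'hm) := by
  unfold pvPref
  rw [List.take_add_one, List.getElem?_eq_getElem hm, List.map_append, List.sum_append]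
  simp

theorem pvFirstLoop (A : List Int) (B : Int) (m : Nat) (hm : m ≤ A.length) (s : Int) :
    (PySem.List.pyRange 0 (m : Int) 1).foldl
      (fun s idx => if B < PySem.List.pyGetD A idx 0 then s + 1 else s) s
      = s + pvPref A B m := by
  induction m generalizing s with
  | zero => simp [PySem.List.pyRange_one_eq_nil (le_refl (0 : Int)), pvPref]
  | succ m ih =>
    have hm' : m < A.length := by omega
    have hcast : ((m + 1 : Nat) : Int) = (m : Int) + 1 := by push_cast; ring
    rw [hcast, PySem.List.pyRange_one_succ_right (by positivity), List.foldl_append,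
      ih (by omega)]
    simp only [List.foldl_cons, List.foldl_nil, PySem.List.pyGetD_natCast,
      List.getD_eq_getElem _ _ hm', pvPref_succ A B m hm', pvBad]
    split <;> ring

theorem pvW_succ (A : List Int) (B : Int) (k i : Nat) (hik : i + k < A.length) :
    pvW A B k (i + 1)
      = pvW A B k i - pvBad B (A[i]'(by omega)) + pvBad B (A[i + k]'hik) := by
  have h1 : pvPref A B (i + 1 + k) = pvPref A B (i + k) + pvBad B (A[i + k]'hik) := by
    have := pvPref_succ A B (i + k) hik
    simpa [show i + 1 + k = i + k + 1 by omega] using this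
  have h2 : pvPref A B (i + 1) = pvPref A B i + pvBad B (A[i]'(by omega)) :=
    pvPref_succ A B i (by omega)
  simp [pvW, h1, h2]; ring

-- the body of A's while loop, as a named function (definitionally the port's lambda)
def pvStepA (A : List Int) (B : Int) (st : Int × Int × Int) (e : Int) : Int × Int × Int :=
  let swap1 := if B < PySem.List.pyGetD A (st.2.2 - 1) 0 then st.1 - 1 else st.1
  let swap2 := if B < PySem.List.pyGetD A e 0 then swap1 + 1 else swap1
  (swap2, min swap2 st.2.1, st.2.2 + 1)

theorem pvWhile (A : List Int) (B : Int) (k : Nat) :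
    ∀ (r t : Nat), t + r = A.length → k ≤ t → ∀ (mn : Int),
    ((PySem.List.pyRange (t : Int) (A.length : Int) 1).foldl (pvStepA A B)
       (pvW A B k (t - k), mn, ((t - k : Nat) : Int) + 1)).2.1
      = pvMins A B k mn (t - k) r := by
  intro r
  induction r with
  | zero =>
    intro t ht hk mn
    have : t = A.length := by omega
    subst this
    simp [PySem.List.pyRange_one_eq_nil (le_refl ((A.length : Nat) : Int)), pvMins]
  | succ r ih =>
    intro t ht hk mn
    have htn : t < A.length := by omega
    rw [PySem.List.pyRange_one_cons (by exact_mod_cast htn), List.foldl_cons]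
    have hget1 : PySem.List.pyGetD A ((t - k : Nat) : Int) 0 = A[t - k]'(by omega) := by
      rw [PySem.List.pyGetD_natCast]; exact List.getD_eq_getElem _ _ (by omega)
    have hget2 : PySem.List.pyGetD A (t : Int) 0 = A[t]'htn := by
      rw [PySem.List.pyGetD_natCast]; exact List.getD_eq_getElem _ _ htn
    have happ : pvStepA A B (pvW A B k (t - k), mn, ((t - k : Nat) : Int) + 1) (t : Int)
        = (pvW A B k (t - k + 1), min (pvW A B k (t - k + 1)) mn,
            ((t + 1 - k : Nat) : Int) + 1) := by
      have hidx0 : t - k + k = t := by omega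
      have hsw : (if B < PySem.List.pyGetD A (t : Int) 0 then
          (if B < PySem.List.pyGetD A (((t - k : Nat) : Int) + 1 - 1) 0 then
            pvW A B k (t - k) - 1 else pvW A B k (t - k)) + 1
          else (if B < PySem.List.pyGetD A (((t - k : Nat) : Int) + 1 - 1) 0 then
            pvW A B k (t - k) - 1 else pvW A B k (t - k)))
          = pvW A B k (t - k + 1) := by
        rw [show ((t - k : Nat) : Int) + 1 - 1 = ((t - k : Nat) : Int) by ring,
          hget1, hget2, pvW_succ A B k (t - k) (by omega)]
        simp only [pvBad, hidx0]
        split <;> split <;> ring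
      simp only [pvStepA, hsw]
      refine congrArg _ (congrArg _ ?_)
      omega
    rw [happ, show ((t : Int) + 1) = ((t + 1 : Nat) : Int) by push_cast; ring]
    have hidx : t + 1 - k = t - k + 1 := by omega
    rw [show pvW A B k (t - k + 1) = pvW A B k (t + 1 - k) by rw [hidx]]
    rw [ih (t + 1) (by omega) (by omega) (min (pvW A B k (t + 1 - k)) mn)]
    simp [pvMins, hidx]

theorem pvFoldMin (A : List Int) (B : Int) (k : Nat) :
    ∀ (r i : Nat) (mn : Int),
    List.foldl min mn ((List.range r).map (fun j => pvW A B k (i + 1 + j)))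
      = pvMins A B k mn i r := by
  intro r
  induction r with
  | zero => intro i mn; simp [pvMins]
  | succ r ih =>
    intro i mn
    rw [List.range_succ_eq_map]
    simp only [List.map_cons, List.map_map, List.foldl_cons]
    rw [min_comm]
    have : (fun j => pvW A B k (i + 1 + j)) ∘ Nat.succ
        = fun j => pvW A B k (i + 1 + 1 + j) := by
      funext j; simp only [Function.comp]; congr 1; omega
    rw [this, show i + 1 + 0 = i + 1 by omega, ih (i + 1) (min (pvW A B k (i + 1)) mn)]
    simp [pvMins]

theorem pvCount (A : List Int) (B : Int) :
    (A.countP (fun a => decide (a ≤ B)) : Int) = (A.length : Int) - pvPref A B A.length := by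
  have hp : pvPref A B A.length = ((A.countP (fun a => decide (B < a)) : Nat) : Int) := by
    have h := PySem.List.sum_map_ite_one_zero (fun a => decide (B < a)) A
    simp only [decide_eq_true_eq] at h
    unfold pvPref
    rw [List.take_length]
    exact h
  have h2 : A.countP (fun a => decide (a ≤ B))
      = A.countP (fun a => decide (¬ (decide (B < a)) = true)) :=
    List.countP_congr (fun a _ => by simp [not_lt])
  have hl := List.length_eq_countP_add_countP (fun a => decide (B < a)) (l := A)
  simp only [] at hl
  rw [hp, h2]
  omega

theorem pvAside (A : List Int) (B : Int) :
    solveTogether A B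
      = pvMins A B (A.countP (fun a => decide (a ≤ B)))
          (pvW A B (A.countP (fun a => decide (a ≤ B))) 0) 0
          (A.length - A.countP (fun a => decide (a ≤ B))) := by
  have hkn : A.countP (fun a => decide (a ≤ B)) ≤ A.length := List.countP_le_length
  set k := A.countP (fun a => decide (a ≤ B)) with hk
  unfold solveTogether
  have hcount : A.foldl (fun c it => if it ≤ B then c + 1 else c) 0 = (k : Int) := by
    have h := PySem.List.foldl_count_if (fun it => decide (it ≤ B)) A 0
    simp only [decide_eq_true_eq] at h
    simpa using h
  simp only [hcount]
  rw [pvFirstLoop A B k hkn 0]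
  have hW0 : (0 : Int) + pvPref A B k = pvW A B k 0 := by simp [pvW, pvPref]
  rw [hW0]
  rw [show (fun (st : Int × Int × Int) e =>
        let swap1 := if B < PySem.List.pyGetD A (st.2.2 - 1) 0 then st.1 - 1 else st.1
        let swap2 := if B < PySem.List.pyGetD A e 0 then swap1 + 1 else swap1
        (swap2, min swap2 st.2.1, st.2.2 + 1)) = pvStepA A B from rfl]
  have h := pvWhile A B k (A.length - k) k (by omega) (le_refl k) (pvW A B k 0)
  simp only [Nat.sub_self, Nat.cast_zero, zero_add] at h
  exact h

theorem pvBside (A : List Int) (B : Int) :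
    solveTogether_alt A B
      = pvMins A B (A.countP (fun a => decide (a ≤ B)))
          (pvW A B (A.countP (fun a => decide (a ≤ B))) 0) 0
          (A.length - A.countP (fun a => decide (a ≤ B))) := by
  have hkn : A.countP (fun a => decide (a ≤ B)) ≤ A.length := List.countP_le_length
  set k := A.countP (fun a => decide (a ≤ B)) with hk
  unfold solveTogether_alt
  have hP : A.foldl (fun P x => P ++ [PySem.List.pyGetD P (-1) 0 + (if B < x then 1 else 0)]) [0]
      = 0 :: pvScan B 0 A := by
    rw [pvBuildP A B [0] 0 (by rfl)]; rfl
  simp only [hP]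
  rw [pvP_get A B A.length (le_refl _)]
  rw [show (A.length : Int) - pvPref A B A.length = (k : Int) from (pvCount A B).symm]
  rw [show (A.length : Int) - (k : Int) + 1 = ((A.length - k + 1 : Nat) : Int) by omega]
  rw [PySem.List.pyRange_zero_natCast, List.map_map]
  have hmap : ((List.range (A.length - k + 1)).map
        ((fun i => PySem.List.pyGetD (0 :: pvScan B 0 A) (i + (k : Int)) 0
          - PySem.List.pyGetD (0 :: pvScan B 0 A) i 0) ∘ (fun j : Nat => (j : Int))))
      = (List.range (A.length - k + 1)).map (fun j : Nat => pvW A B k j) := by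
    apply List.map_congr_left
    intro j hj
    have hjn : j + k ≤ A.length := by
      have := List.mem_range.mp hj; omega
    simp only [Function.comp]
    rw [show (j : Int) + (k : Int) = ((j + k : Nat) : Int) by push_cast; ring]
    rw [pvP_get A B (j + k) hjn, pvP_get A B j (by omega)]
    rfl
  rw [hmap, List.range_succ_eq_map, List.map_cons, List.map_map]
  rw [PySem.List.min?_id_cons]
  rw [show ((fun j : Nat => pvW A B k j) ∘ Nat.succ)
      = fun j : Nat => pvW A B k (0 + 1 + j) from by
    funext j; simp only [Function.comp]; congr 1; omega]
  rw [Option.getD_some, pvFoldMin A B k (A.length - k) 0 (pvW A B k (0 + 0))]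

theorem solveTogether_spec : Claim_equal_solveTogether := by
  intro A B _
  unfold Spec_solveTogether
  rw [pvAside, pvBside]
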